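-- pv_equiv track=rewrite | github.com/d1scordeon/TZI_lab4 | lab4_code.py | embed_message
-- ===== SOURCE A (Python) =====
-- def embed_message(container, message):
--     words = container.split()
--     result = []
--     for i, word in enumerate(words):
--         if i < len(message):
--             result.append(word + message[i])
--         else:
--             result.append(word)
--     return ' '.join(result)
-- ===== SOURCE B (Python) =====
-- def embed_message(container, message):
--     def go(ws, ms):
--         if not ws:
--             return ''
--         if len(ws) == 1:
--             return ws[0] + ms[:1]
--         return ws[0] + ms[:1] + ' ' + go(ws[1:], ms[1:])
--     return go(container.split(), message)
-- ===== Notes on version B (the rewrite author's own statement) =====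
-- stated objective: alternative
-- what changed: Replaces A's indexed accumulate-then-join loop (enumerate, per-element 'if i < len(message)' guard, ' '.join) by a recursive descent that consumes the word list and the message in lockstep and builds the final spaced string directly, using ms[:1] truncation instead of an index test and no join/accumulator at all.
import Mathlib
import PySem

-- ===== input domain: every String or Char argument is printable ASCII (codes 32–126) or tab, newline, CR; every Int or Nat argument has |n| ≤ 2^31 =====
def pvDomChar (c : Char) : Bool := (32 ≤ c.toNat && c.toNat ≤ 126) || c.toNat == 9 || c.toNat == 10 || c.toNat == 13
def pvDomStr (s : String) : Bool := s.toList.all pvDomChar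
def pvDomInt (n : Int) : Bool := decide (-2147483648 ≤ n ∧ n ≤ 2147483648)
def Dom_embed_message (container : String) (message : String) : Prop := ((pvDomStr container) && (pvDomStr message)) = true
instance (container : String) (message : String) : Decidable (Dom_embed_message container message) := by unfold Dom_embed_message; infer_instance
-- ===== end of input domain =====

-- B rebuilds the result by a recursive descent over (words, message) that emits the spaced
-- string directly, replacing A's indexed accumulate-then-join loop; objective: alternative, same cost.

-- ===== PORT A =====
-- literal port of A: split, loop over enumerate(words) appending word+message[i] when i < len(message)
-- (under the guard the index is in range, so pyGet?'s Option is some; .toList appends that one char — exact)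
def embed_message (container : String) (message : String) : String :=
  let words := PySem.Chars.split₀ container.toList
  let msg := message.toList
  let result := (PySem.List.enumerate words 0).foldl
    (fun acc iw =>
      if iw.1 < (msg.length : Int) then
        acc ++ [iw.2 ++ (PySem.List.pyGet? msg iw.1).toList]
      else
        acc ++ [iw.2]) []
  String.ofList (PySem.Chars.join [' '] result)

-- ===== PORT B =====
-- go(ws, ms): '' for no words; last word gets ms[:1]; otherwise word + ms[:1] + ' ' + go(rest, ms[1:])
def embedGo : List (List Char) → List Char → List Char
  | [], _ => []
  | [w], ms => w ++ PySem.List.slice ms none (some 1)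
  | w :: ws, ms =>
      w ++ PySem.List.slice ms none (some 1) ++ ' ' :: embedGo ws (PySem.List.slice ms (some 1) none)

def embed_message_alt (container : String) (message : String) : String :=
  String.ofList (embedGo (PySem.Chars.split₀ container.toList) message.toList)

-- ===== PRECONDITION & SPEC =====
def Spec_embed_message (container : String) (message : String) (out : String) : Prop := out = embed_message_alt container message
instance (container : String) (message : String) (out : String) : Decidable (Spec_embed_message container message out) := by unfold Spec_embed_message; infer_instance

-- ===== CLAIM (what is proved, stated in full; the proofs are below) =====
def Claim_equal_embed_message : Prop := ∀ (container : String) (message : String), Dom_embed_message container message → Spec_embed_message container message (embed_message container message)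

-- ===== LEMMAS AND PROOFS =====

-- A's loop over enumerate(words, s): characterization against take/zip/drop of the remaining message
theorem embed_loop_eq (words : List (List Char)) :
    ∀ (s : Nat) (msg : List Char) (acc : List (List Char)),
    (PySem.List.enumerate words (s : Int)).foldl
      (fun acc iw =>
        if iw.1 < (msg.length : Int) then
          acc ++ [iw.2 ++ (PySem.List.pyGet? msg iw.1).toList]
        else
          acc ++ [iw.2]) acc
    = acc ++ ((words.take (msg.length - s)).zip (msg.drop s)).map (fun wc => wc.1 ++ [wc.2])
        ++ words.drop (msg.length - s) := by
  induction words with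
  | nil => intro s msg acc; simp [PySem.List.enumerate_nil]
  | cons w ws ih =>
    intro s msg acc
    rw [PySem.List.enumerate_cons]
    simp only [List.foldl_cons]
    by_cases h : s < msg.length
    · have hdrop : msg.drop s = msg[s] :: msg.drop (s + 1) := by
        exact (List.drop_eq_getElem_cons h)
      have hsub : msg.length - s = (msg.length - (s + 1)) + 1 := by omega
      rw [if_pos (by exact_mod_cast h)]
      have hcast : ((s : Int) + 1) = ((s + 1 : Nat) : Int) := by push_cast; ring
      rw [hcast, ih (s + 1) msg]
      rw [hsub, List.take_succ_cons, List.drop_succ_cons, hdrop, List.zip_cons_cons, List.map_cons]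
      have hone : (PySem.List.pyGet? msg (s : Int)).toList = [msg[s]] := by
        simp [PySem.List.pyGet?_natCast, List.getElem?_eq_getElem h]
      rw [hone]
      simp
    · rw [if_neg (by exact_mod_cast h)]
      have : ((s : Int) + 1) = ((s + 1 : Nat) : Int) := by push_cast; ring
      rw [this, ih (s + 1) msg]
      have h0 : msg.length - s = 0 := by omega
      have h1 : msg.length - (s + 1) = 0 := by omega
      simp [h0, h1]

-- B's slices on the message are take 1 / drop 1
theorem slice_to_one (ms : List Char) : PySem.List.slice ms none (some 1) = ms.take 1 := by
  have := PySem.List.slice_to_natCast (xs := ms) (b := 1)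
  simpa using this

theorem slice_from_one' (ms : List Char) : PySem.List.slice ms (some 1) none = ms.drop 1 := by
  have := PySem.List.slice_from_natCast (xs := ms) (a := 1)
  simpa using this

-- the join of A's accumulated list equals B's recursive descent
theorem join_eq_embedGo :
    ∀ (words : List (List Char)) (msg : List Char),
    PySem.Chars.join [' ']
      (((words.take msg.length).zip msg).map (fun wc => wc.1 ++ [wc.2]) ++ words.drop msg.length)
    = embedGo words msg := by
  intro words
  induction words with
  | nil => intro msg; simp [embedGo, PySem.Chars.join_nil]
  | cons w ws ih =>
    intro msg
    cases msg with
    | nil =>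
      cases ws with
      | nil => simp [embedGo, PySem.Chars.join_singleton, slice_to_one]
      | cons w' ws' =>
        have := ih []
        simp only [List.length_nil, List.take_zero, List.zip_nil_right, List.map_nil,
          List.drop_zero, List.nil_append] at this ⊢
        rw [embedGo, slice_to_one, PySem.List.slice_from_one]
        simp only [List.take_nil, List.append_nil, List.tail_nil]
        rw [PySem.Chars.join_cons_cons, this]
        all_goals simp
    | cons c cs =>
      cases ws with
      | nil =>
        simp [embedGo, PySem.Chars.join_singleton, slice_to_one]
      | cons w' ws' =>
        rw [embedGo, slice_to_one, slice_from_one']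
        simp only [List.length_cons, List.take_succ_cons, List.drop_succ_cons,
          List.zip_cons_cons, List.map_cons, List.cons_append,]
        have hne : ((((w' :: ws').take cs.length).zip cs).map (fun wc => wc.1 ++ [wc.2])
            ++ (w' :: ws').drop cs.length) ≠ [] := by
          cases cs with
          | nil => simp
          | cons d ds => simp
        rcases List.exists_cons_of_ne_nil hne with ⟨y, t, hyt⟩
        rw [hyt, PySem.Chars.join_cons_cons, ← hyt, ih cs]
        all_goals simp

-- ===== VERDICT (by name: the statement is the Claim_ definition above) =====
theorem embed_message_spec : Claim_equal_embed_message := by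
  intro container message _
  unfold Spec_embed_message embed_message embed_message_alt
  dsimp only
  have := embed_loop_eq (PySem.Chars.split₀ container.toList) 0 message.toList []
  simp only [Nat.cast_zero, Nat.sub_zero, List.drop_zero, List.nil_append] at this
  rw [this, join_eq_embedGo]
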